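-- pv_equiv track=rewrite | github.com/pbalogh/hydra | code/operator_hierarchy.py | _infer_from_name
-- ===== SOURCE A (Python) =====
-- from typing import Dict, List, Optional, Tuple
--
-- def _infer_from_name(relation: str, bindings: Dict) -> Tuple[str, str, Dict]:
--     """Heuristic classification from relation name."""
--     rel = relation.lower()
--
--     # PTRANS indicators
--     if any(w in rel for w in ["born", "birth", "native"]):
--         return "PTRANS", "Birth", bindings
--     if any(w in rel for w in ["died", "death"]):
--         return "PTRANS", "Death", bindings
--     if any(w in rel for w in ["located", "location", "place", "country", "city"]):
--         return "PTRANS", "Location", bindings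
--
--     # MTRANS indicators
--     if any(w in rel for w in ["author", "wrote", "composed", "created"]):
--         return "MTRANS", "Authorship", bindings
--     if any(w in rel for w in ["directed", "director"]):
--         return "MTRANS", "Direction", bindings
--     if any(w in rel for w in ["educated", "studied", "school", "university"]):
--         return "MTRANS", "Education", bindings
--
--     # ATRANS indicators
--     if any(w in rel for w in ["founded", "owned", "acquired"]):
--         return "ATRANS", "Ownership", bindings
--     if any(w in rel for w in ["employed", "works_for", "plays_for", "ceo"]):
--         return "ATRANS", "Employment", bindings
--     if any(w in rel for w in ["father", "mother", "spouse", "child", "married"]):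
--         return "ATRANS", "Kinship", bindings
--     if any(w in rel for w in ["citizen", "nationality"]):
--         return "ATRANS", "Citizenship", bindings
--
--     # IS_A indicators
--     if any(w in rel for w in ["instance", "type", "kind", "class", "occupation", "genre"]):
--         return "IS_A", "Instance", bindings
--
--     # PARTOF indicators
--     if any(w in rel for w in ["part_of", "member", "contains", "has_part"]):
--         return "PARTOF", "Component", bindings
--
--     # Default: unknown transfer
--     return "TRANSFER", "Unknown", bindings
-- ===== SOURCE B (Python) =====
-- # Different algorithm: instead of testing each keyword against the string,
-- # enumerate the substrings of the (lowercased) relation of length 1..11 and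
-- # look each up in a hash map keyword -> (priority, category, label), keeping
-- # the entry with the smallest priority; lower priority = earlier rule in the
-- # original chain, so the result is identical.
-- _KW = {}
-- for _prio, (_cat, _label, _words) in enumerate([
--     ("PTRANS", "Birth", ["born", "birth", "native"]),
--     ("PTRANS", "Death", ["died", "death"]),
--     ("PTRANS", "Location", ["located", "location", "place", "country", "city"]),
--     ("MTRANS", "Authorship", ["author", "wrote", "composed", "created"]),
--     ("MTRANS", "Direction", ["directed", "director"]),
--     ("MTRANS", "Education", ["educated", "studied", "school", "university"]),
--     ("ATRANS", "Ownership", ["founded", "owned", "acquired"]),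
--     ("ATRANS", "Employment", ["employed", "works_for", "plays_for", "ceo"]),
--     ("ATRANS", "Kinship", ["father", "mother", "spouse", "child", "married"]),
--     ("ATRANS", "Citizenship", ["citizen", "nationality"]),
--     ("IS_A", "Instance", ["instance", "type", "kind", "class", "occupation", "genre"]),
--     ("PARTOF", "Component", ["part_of", "member", "contains", "has_part"]),
-- ]):
--     for _w in _words:
--         _KW[_w] = (_prio, _cat, _label)
--
-- def _infer_from_name(relation, bindings):
--     rel = relation.lower()
--     n = len(rel)
--     best = (12, "TRANSFER", "Unknown")
--     for i in range(n):
--         for j in range(i + 1, min(i + 11, n) + 1):  # no keyword is longer than 11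
--             hit = _KW.get(rel[i:j])
--             if hit is not None and hit[0] < best[0]:
--                 best = hit
--     return best[1], best[2], bindings
-- ===== Notes on version B (the rewrite author's own statement) =====
-- stated objective: alternative
-- what changed: Inverted the traversal: instead of scanning the relation once per keyword through a 12-branch if-chain, B enumerates the substrings of the lowercased relation (lengths 1..11) and looks each up in a hash map keyword -> (priority, category, label), keeping the hit with the smallest priority; the priority order reproduces the chain's first-match semantics.
import Mathlib
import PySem

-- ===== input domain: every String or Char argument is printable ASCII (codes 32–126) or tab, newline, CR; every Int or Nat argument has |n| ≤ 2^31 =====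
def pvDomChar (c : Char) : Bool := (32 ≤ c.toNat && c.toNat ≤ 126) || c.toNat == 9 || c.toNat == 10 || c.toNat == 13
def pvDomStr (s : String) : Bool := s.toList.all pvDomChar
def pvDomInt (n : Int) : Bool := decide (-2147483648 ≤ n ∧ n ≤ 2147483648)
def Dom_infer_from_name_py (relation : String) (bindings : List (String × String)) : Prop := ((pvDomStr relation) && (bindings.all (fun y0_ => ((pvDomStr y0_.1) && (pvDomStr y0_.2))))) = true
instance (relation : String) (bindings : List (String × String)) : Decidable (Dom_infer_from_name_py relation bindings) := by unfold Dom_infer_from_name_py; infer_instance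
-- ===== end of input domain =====

-- B replaces A's per-keyword substring scans by the opposite traversal: it enumerates the
-- substrings of the lowercased relation (lengths 1..11) and looks each up in a hash map
-- keyword -> (priority, category, label), keeping the smallest priority (alternative; same result).

-- ===== PORT A =====
def infer_from_name_py (relation : String) (bindings : List (String × String)) : String × String × (List (String × String)) :=
  let rel := PySem.Str.lower relation
  if ["born", "birth", "native"].any (fun w => PySem.Str.isIn w rel) then
    ("PTRANS", "Birth", bindings)
  else if ["died", "death"].any (fun w => PySem.Str.isIn w rel) then
    ("PTRANS", "Death", bindings)
  else if ["located", "location", "place", "country", "city"].any (fun w => PySem.Str.isIn w rel) then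
    ("PTRANS", "Location", bindings)
  else if ["author", "wrote", "composed", "created"].any (fun w => PySem.Str.isIn w rel) then
    ("MTRANS", "Authorship", bindings)
  else if ["directed", "director"].any (fun w => PySem.Str.isIn w rel) then
    ("MTRANS", "Direction", bindings)
  else if ["educated", "studied", "school", "university"].any (fun w => PySem.Str.isIn w rel) then
    ("MTRANS", "Education", bindings)
  else if ["founded", "owned", "acquired"].any (fun w => PySem.Str.isIn w rel) then
    ("ATRANS", "Ownership", bindings)
  else if ["employed", "works_for", "plays_for", "ceo"].any (fun w => PySem.Str.isIn w rel) then
    ("ATRANS", "Employment", bindings)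
  else if ["father", "mother", "spouse", "child", "married"].any (fun w => PySem.Str.isIn w rel) then
    ("ATRANS", "Kinship", bindings)
  else if ["citizen", "nationality"].any (fun w => PySem.Str.isIn w rel) then
    ("ATRANS", "Citizenship", bindings)
  else if ["instance", "type", "kind", "class", "occupation", "genre"].any (fun w => PySem.Str.isIn w rel) then
    ("IS_A", "Instance", bindings)
  else if ["part_of", "member", "contains", "has_part"].any (fun w => PySem.Str.isIn w rel) then
    ("PARTOF", "Component", bindings)
  else
    ("TRANSFER", "Unknown", bindings)

-- ===== PORT B =====
-- the hash map _KW: keyword -> (priority, category, label)  (strings modelled as List Char)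
def pvKw : PySem.Dict (List Char) (Int × String × String) :=
  PySem.Dict.ofList [
    ("born".toList, (0, "PTRANS", "Birth")), ("birth".toList, (0, "PTRANS", "Birth")), ("native".toList, (0, "PTRANS", "Birth")),
    ("died".toList, (1, "PTRANS", "Death")), ("death".toList, (1, "PTRANS", "Death")),
    ("located".toList, (2, "PTRANS", "Location")), ("location".toList, (2, "PTRANS", "Location")), ("place".toList, (2, "PTRANS", "Location")), ("country".toList, (2, "PTRANS", "Location")), ("city".toList, (2, "PTRANS", "Location")),
    ("author".toList, (3, "MTRANS", "Authorship")), ("wrote".toList, (3, "MTRANS", "Authorship")), ("composed".toList, (3, "MTRANS", "Authorship")), ("created".toList, (3, "MTRANS", "Authorship")),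
    ("directed".toList, (4, "MTRANS", "Direction")), ("director".toList, (4, "MTRANS", "Direction")),
    ("educated".toList, (5, "MTRANS", "Education")), ("studied".toList, (5, "MTRANS", "Education")), ("school".toList, (5, "MTRANS", "Education")), ("university".toList, (5, "MTRANS", "Education")),
    ("founded".toList, (6, "ATRANS", "Ownership")), ("owned".toList, (6, "ATRANS", "Ownership")), ("acquired".toList, (6, "ATRANS", "Ownership")),
    ("employed".toList, (7, "ATRANS", "Employment")), ("works_for".toList, (7, "ATRANS", "Employment")), ("plays_for".toList, (7, "ATRANS", "Employment")), ("ceo".toList, (7, "ATRANS", "Employment")),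
    ("father".toList, (8, "ATRANS", "Kinship")), ("mother".toList, (8, "ATRANS", "Kinship")), ("spouse".toList, (8, "ATRANS", "Kinship")), ("child".toList, (8, "ATRANS", "Kinship")), ("married".toList, (8, "ATRANS", "Kinship")),
    ("citizen".toList, (9, "ATRANS", "Citizenship")), ("nationality".toList, (9, "ATRANS", "Citizenship")),
    ("instance".toList, (10, "IS_A", "Instance")), ("type".toList, (10, "IS_A", "Instance")), ("kind".toList, (10, "IS_A", "Instance")), ("class".toList, (10, "IS_A", "Instance")), ("occupation".toList, (10, "IS_A", "Instance")), ("genre".toList, (10, "IS_A", "Instance")),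
    ("part_of".toList, (11, "PARTOF", "Component")), ("member".toList, (11, "PARTOF", "Component")), ("contains".toList, (11, "PARTOF", "Component")), ("has_part".toList, (11, "PARTOF", "Component")) ]

def infer_from_name_py_alt (relation : String) (bindings : List (String × String)) : String × String × (List (String × String)) :=
  let rel := (PySem.Str.lower relation).toList
  let n := rel.length
  let best := (List.range n).foldl (fun best i =>
      (List.range' (i + 1) (min (i + 11) n - i)).foldl (fun best (j : Nat) =>
        match pvKw.get? (PySem.List.slice rel (some (i : Int)) (some (j : Int))) with
        | some hit => if hit.1 < best.1 then hit else best
        | none => best) best) ((12 : Int), "TRANSFER", "Unknown")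
  (best.2.1, best.2.2, bindings)

-- ===== PRECONDITION & SPEC =====
def Spec_infer_from_name_py (relation : String) (bindings : List (String × String)) (out : String × String × (List (String × String))) : Prop := out = infer_from_name_py_alt relation bindings
instance (relation : String) (bindings : List (String × String)) (out : String × String × (List (String × String))) : Decidable (Spec_infer_from_name_py relation bindings out) := by unfold Spec_infer_from_name_py; infer_instance

-- ===== CLAIM (what is proved, stated in full; the proofs are below) =====
def Claim_equal_infer_from_name_py : Prop := ∀ (relation : String) (bindings : List (String × String)), Dom_infer_from_name_py relation bindings → Spec_infer_from_name_py relation bindings (infer_from_name_py relation bindings)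

-- ===== LEMMAS AND PROOFS =====

-- the canonical triple for each priority
def pvVal (r : Int) : Int × String × String :=
  if r = 0 then (0, "PTRANS", "Birth")
  else if r = 1 then (1, "PTRANS", "Death")
  else if r = 2 then (2, "PTRANS", "Location")
  else if r = 3 then (3, "MTRANS", "Authorship")
  else if r = 4 then (4, "MTRANS", "Direction")
  else if r = 5 then (5, "MTRANS", "Education")
  else if r = 6 then (6, "ATRANS", "Ownership")
  else if r = 7 then (7, "ATRANS", "Employment")
  else if r = 8 then (8, "ATRANS", "Kinship")
  else if r = 9 then (9, "ATRANS", "Citizenship")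
  else if r = 10 then (10, "IS_A", "Instance")
  else if r = 11 then (11, "PARTOF", "Component")
  else (12, "TRANSFER", "Unknown")

-- the candidate entries B's double loop looks up: one per (i, j) whose slice is a keyword
def pvCands (rel : List Char) : List (Int × String × String) :=
  ((List.range rel.length).flatMap (fun i =>
      (List.range' (i + 1) (min (i + 11) rel.length - i)).map (fun j => (i, j)))).filterMap
    (fun p => pvKw.get? (PySem.List.slice rel (some (p.1 : Int)) (some (p.2 : Int))))

def pvMin (rel : List Char) : Int := (pvCands rel).foldl (fun m h => min m h.1) 12

-- does some keyword of priority r occur in rel?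
def pvHit (rel : List Char) (r : Int) : Bool :=
  pvKw.items.any (fun q => q.2.1 == r && PySem.Chars.isIn q.1 rel)


set_option maxRecDepth 16384 in
set_option maxHeartbeats 2000000 in
theorem pvKw_nodup : pvKw.keys.Nodup := by decide
set_option maxRecDepth 16384 in
set_option maxHeartbeats 2000000 in
theorem pvKw_items_facts : ∀ q ∈ pvKw.items, q.2 = pvVal q.2.1 ∧ 0 ≤ q.2.1 ∧ q.2.1 ≤ 11 ∧ q.1 ≠ [] ∧ q.1.length ≤ 11 := by decide

theorem pvVal_fst (r : Int) (h0 : 0 ≤ r) (h12 : r ≤ 12) : (pvVal r).1 = r := by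
  have : r = 0 ∨ r = 1 ∨ r = 2 ∨ r = 3 ∨ r = 4 ∨ r = 5 ∨ r = 6 ∨ r = 7 ∨ r = 8 ∨ r = 9 ∨ r = 10 ∨ r = 11 ∨ r = 12 := by omega
  rcases this with h|h|h|h|h|h|h|h|h|h|h|h|h <;> subst h <;> rfl

theorem pv_foldl_nest {α β σ : Type} (l : List α) (h : α → List β) (g : σ → α → β → σ) (init : σ) :
    l.foldl (fun s a => (h a).foldl (fun s b => g s a b) s) init
      = (l.flatMap (fun a => (h a).map (fun b => (a, b)))).foldl (fun s p => g s p.1 p.2) init := by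
  induction l generalizing init with
  | nil => rfl
  | cons x xs ih => simp [List.flatMap_cons, List.foldl_append, List.foldl_map, ih]

theorem pv_fm (rel : List Char) (l : List (Nat × Nat)) (init : Int × String × String) :
    l.foldl (fun s p =>
        match pvKw.get? (PySem.List.slice rel (some (p.1 : Int)) (some (p.2 : Int))) with
        | some hit => if hit.1 < s.1 then hit else s
        | none => s) init
      = (l.filterMap (fun p => pvKw.get? (PySem.List.slice rel (some (p.1 : Int)) (some (p.2 : Int))))).foldl
          (fun b h => if h.1 < b.1 then h else b) init := by
  induction l generalizing init with
  | nil => rfl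
  | cons x xs ih =>
    cases hx : pvKw.get? (PySem.List.slice rel (some (x.1 : Int)) (some (x.2 : Int))) <;>
      simp [hx, ih]

theorem pv_foldl_min_le_init {γ : Type} (l : List γ) (f : γ → Int) (a : Int) :
    l.foldl (fun m y => min m (f y)) a ≤ a := by
  induction l generalizing a with
  | nil => simp
  | cons x xs ih => exact le_trans (ih _) (min_le_left _ _)

theorem pv_foldl_min_le_of_mem {γ : Type} (l : List γ) (f : γ → Int) (a : Int) (h : γ)
    (hm : h ∈ l) : l.foldl (fun m y => min m (f y)) a ≤ f h := by
  induction l generalizing a with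
  | nil => cases hm
  | cons x xs ih =>
    simp only [List.foldl_cons]
    rcases List.mem_cons.mp hm with rfl | hm'
    · exact le_trans (pv_foldl_min_le_init xs f (min a (f h))) (min_le_right _ _)
    · exact ih (min a (f x)) hm'

theorem pv_foldl_min_cases {γ : Type} (l : List γ) (f : γ → Int) (a : Int) :
    l.foldl (fun m y => min m (f y)) a = a ∨ ∃ h ∈ l, l.foldl (fun m y => min m (f y)) a = f h := by
  induction l generalizing a with
  | nil => exact Or.inl rfl
  | cons x xs ih =>
    rcases ih (min a (f x)) with heq | ⟨h, hm, heq⟩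
    · rcases min_cases a (f x) with ⟨hmin, _⟩ | ⟨hmin, _⟩
      · exact Or.inl (by simpa [hmin] using heq)
      · exact Or.inr ⟨x, List.mem_cons_self .., by simpa [hmin] using heq⟩
    · exact Or.inr ⟨h, List.mem_cons_of_mem _ hm, heq⟩

theorem pv_foldl_step (l : List (Int × String × String)) (a : Int)
    (ha0 : 0 ≤ a) (ha : a ≤ 12)
    (hl : ∀ h ∈ l, h = pvVal h.1 ∧ 0 ≤ h.1 ∧ h.1 ≤ 11) :
    l.foldl (fun b h => if h.1 < b.1 then h else b) (pvVal a)
      = pvVal (l.foldl (fun m h => min m h.1) a) := by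
  induction l generalizing a with
  | nil => rfl
  | cons x xs ih =>
    obtain ⟨hx, hx0, hx11⟩ := hl x (List.mem_cons_self ..)
    have hfst : (pvVal a).1 = a := pvVal_fst a ha0 ha
    simp only [List.foldl_cons]
    have hstep : (if x.1 < (pvVal a).1 then x else pvVal a) = pvVal (min a x.1) := by
      rw [hfst]
      by_cases hlt : x.1 < a
      · rw [if_pos hlt, min_eq_right (le_of_lt hlt)]; exact hx
      · rw [if_neg hlt, min_eq_left (by omega)]
    rw [hstep, ih (min a x.1) (by omega) (by omega) (fun h hm => hl h (List.mem_cons_of_mem _ hm))]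

theorem pv_cands_facts (rel : List Char) : ∀ h ∈ pvCands rel, h = pvVal h.1 ∧ 0 ≤ h.1 ∧ h.1 ≤ 11 := by
  intro h hm
  obtain ⟨p, hp, hget⟩ := List.mem_filterMap.mp hm
  have hmem := PySem.Dict.mem_items_of_get?_eq_some pvKw hget
  have := pvKw_items_facts _ hmem
  exact ⟨this.1, this.2.1, this.2.2.1⟩

theorem pv_min_le_of_hit (rel : List Char) (r : Int) (h : pvHit rel r = true) : pvMin rel ≤ r := by
  obtain ⟨q, hq, hcond⟩ := List.any_eq_true.mp h
  obtain ⟨hr, hin⟩ := (Bool.and_eq_true _ _) ▸ hcond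
  have hr' : q.2.1 = r := by simpa using hr
  obtain ⟨i, hpre⟩ := (PySem.Chars.exists_prefix_drop_iff_isIn q.1 rel).mpr hin
  obtain ⟨-, -, -, hne, hlen⟩ := pvKw_items_facts q hq
  have hdrop : rel.drop i ≠ [] := fun hd => hne (List.prefix_nil.mp (hd ▸ hpre))
  have hi : i < rel.length := by
    by_contra hge
    exact hdrop (List.drop_eq_nil_of_le (by omega))
  have hklen : q.1.length ≤ rel.length - i := by
    have := hpre.length_le
    simpa [List.length_drop] using this
  have hpos : 1 ≤ q.1.length := List.length_pos_iff.mpr hne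
  have hmemc : q.2 ∈ pvCands rel := by
    apply List.mem_filterMap.mpr
    refine ⟨(i, i + q.1.length), ?_, ?_⟩
    · apply List.mem_flatMap.mpr
      refine ⟨i, List.mem_range.mpr hi, List.mem_map.mpr ⟨i + q.1.length, ?_, rfl⟩⟩
      exact List.mem_range'_1.mpr ⟨by omega, by omega⟩
    · have hslice : PySem.List.slice rel (some (i : Int)) (some ((i + q.1.length : Nat) : Int))
          = (rel.drop i).take ((i + q.1.length) - i) := PySem.List.slice_natCast rel i (i + q.1.length)
      rw [show ((i + q.1.length : Nat) : Int) = ((i : Int) + (q.1.length : Int)) by push_cast; ring] at hslice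
      rw [show ((i : Int) + (q.1.length : Int)) = (((i + q.1.length : Nat)) : Int) by push_cast; ring] at hslice
      rw [hslice, Nat.add_sub_cancel_left,
        show (rel.drop i).take q.1.length = q.1 from (List.prefix_iff_eq_take.mp hpre).symm]
      exact PySem.Dict.get?_of_mem_items pvKw (by simpa using hq) pvKw_nodup
  calc pvMin rel ≤ q.2.1 := pv_foldl_min_le_of_mem _ _ _ _ hmemc
    _ = r := hr'

theorem pv_min_cases (rel : List Char) :
    pvMin rel = 12 ∨ (pvHit rel (pvMin rel) = true ∧ 0 ≤ pvMin rel ∧ pvMin rel ≤ 11) := by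
  rcases pv_foldl_min_cases (pvCands rel) Prod.fst 12 with heq | ⟨h, hm, heq⟩
  · exact Or.inl heq
  · right
    obtain ⟨-, h0, h11⟩ := pv_cands_facts rel h hm
    obtain ⟨p, hp, hget⟩ := List.mem_filterMap.mp hm
    have hitems := PySem.Dict.mem_items_of_get?_eq_some pvKw hget
    have hinfix : PySem.List.slice rel (some (p.1 : Int)) (some (p.2 : Int)) <:+: rel := by
      rw [PySem.List.slice_natCast rel p.1 p.2]
      exact ((List.take_prefix _ _).isInfix).trans ((List.drop_suffix _ _).isInfix)
    have hin : PySem.Chars.isIn (PySem.List.slice rel (some (p.1 : Int)) (some (p.2 : Int))) rel = true :=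
      (PySem.Chars.isIn_iff_infix _ _).mpr hinfix
    have hhit : pvHit rel h.1 = true := by
      apply List.any_eq_true.mpr
      exact ⟨_, hitems, by simp [hin]⟩
    have hm' : pvMin rel = h.1 := heq
    rw [hm']
    exact ⟨hhit, by omega, by omega⟩

set_option maxRecDepth 8192 in
theorem pv_alt_eq (relation : String) (bindings : List (String × String)) :
    infer_from_name_py_alt relation bindings =
      ((pvVal (pvMin ((PySem.Str.lower relation).toList))).2.1,
       (pvVal (pvMin ((PySem.Str.lower relation).toList))).2.2, bindings) := by
  unfold infer_from_name_py_alt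
  show (((List.range (PySem.Str.lower relation).toList.length).foldl (fun best i =>
      (List.range' (i + 1) (min (i + 11) (PySem.Str.lower relation).toList.length - i)).foldl (fun best (j : Nat) =>
        match pvKw.get? (PySem.List.slice (PySem.Str.lower relation).toList (some (i : Int)) (some (j : Int))) with
        | some hit => if hit.1 < best.1 then hit else best
        | none => best) best) ((12 : Int), "TRANSFER", "Unknown")).2.1,
      ((List.range (PySem.Str.lower relation).toList.length).foldl (fun best i =>
      (List.range' (i + 1) (min (i + 11) (PySem.Str.lower relation).toList.length - i)).foldl (fun best (j : Nat) =>
        match pvKw.get? (PySem.List.slice (PySem.Str.lower relation).toList (some (i : Int)) (some (j : Int))) with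
        | some hit => if hit.1 < best.1 then hit else best
        | none => best) best) ((12 : Int), "TRANSFER", "Unknown")).2.2, bindings) = _
  rw [show ((12 : Int), ("TRANSFER" : String), ("Unknown" : String)) = pvVal 12 from rfl]
  rw [pv_foldl_nest (List.range (PySem.Str.lower relation).toList.length)
      (fun i => List.range' (i + 1) (min (i + 11) (PySem.Str.lower relation).toList.length - i))
      (fun best i j =>
        match pvKw.get? (PySem.List.slice (PySem.Str.lower relation).toList (some (i : Int)) (some (j : Int))) with
        | some hit => if hit.1 < best.1 then hit else best
        | none => best) (pvVal 12)]
  rw [pv_fm (PySem.Str.lower relation).toList]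
  rw [show List.filterMap
        (fun p : Nat × Nat => pvKw.get? (PySem.List.slice (PySem.Str.lower relation).toList (some (p.1 : Int)) (some (p.2 : Int))))
        (List.flatMap
          (fun a : Nat => List.map (fun b : Nat => (a, b))
            (List.range' (a + 1) (min (a + 11) (PySem.Str.lower relation).toList.length - a)))
          (List.range (PySem.Str.lower relation).toList.length))
      = pvCands (PySem.Str.lower relation).toList from rfl]
  rw [pv_foldl_step _ 12 (by omega) (by omega)
      (fun h hm => pv_cands_facts _ h hm)]
  simp only [pvMin]

set_option maxRecDepth 16384 in
set_option maxHeartbeats 2000000 in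
theorem pvKw_items : pvKw.items = [
    ("born".toList, (0, "PTRANS", "Birth")), ("birth".toList, (0, "PTRANS", "Birth")), ("native".toList, (0, "PTRANS", "Birth")),
    ("died".toList, (1, "PTRANS", "Death")), ("death".toList, (1, "PTRANS", "Death")),
    ("located".toList, (2, "PTRANS", "Location")), ("location".toList, (2, "PTRANS", "Location")), ("place".toList, (2, "PTRANS", "Location")), ("country".toList, (2, "PTRANS", "Location")), ("city".toList, (2, "PTRANS", "Location")),
    ("author".toList, (3, "MTRANS", "Authorship")), ("wrote".toList, (3, "MTRANS", "Authorship")), ("composed".toList, (3, "MTRANS", "Authorship")), ("created".toList, (3, "MTRANS", "Authorship")),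
    ("directed".toList, (4, "MTRANS", "Direction")), ("director".toList, (4, "MTRANS", "Direction")),
    ("educated".toList, (5, "MTRANS", "Education")), ("studied".toList, (5, "MTRANS", "Education")), ("school".toList, (5, "MTRANS", "Education")), ("university".toList, (5, "MTRANS", "Education")),
    ("founded".toList, (6, "ATRANS", "Ownership")), ("owned".toList, (6, "ATRANS", "Ownership")), ("acquired".toList, (6, "ATRANS", "Ownership")),
    ("employed".toList, (7, "ATRANS", "Employment")), ("works_for".toList, (7, "ATRANS", "Employment")), ("plays_for".toList, (7, "ATRANS", "Employment")), ("ceo".toList, (7, "ATRANS", "Employment")),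
    ("father".toList, (8, "ATRANS", "Kinship")), ("mother".toList, (8, "ATRANS", "Kinship")), ("spouse".toList, (8, "ATRANS", "Kinship")), ("child".toList, (8, "ATRANS", "Kinship")), ("married".toList, (8, "ATRANS", "Kinship")),
    ("citizen".toList, (9, "ATRANS", "Citizenship")), ("nationality".toList, (9, "ATRANS", "Citizenship")),
    ("instance".toList, (10, "IS_A", "Instance")), ("type".toList, (10, "IS_A", "Instance")), ("kind".toList, (10, "IS_A", "Instance")), ("class".toList, (10, "IS_A", "Instance")), ("occupation".toList, (10, "IS_A", "Instance")), ("genre".toList, (10, "IS_A", "Instance")),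
    ("part_of".toList, (11, "PARTOF", "Component")), ("member".toList, (11, "PARTOF", "Component")), ("contains".toList, (11, "PARTOF", "Component")), ("has_part".toList, (11, "PARTOF", "Component")) ] := by rfl

theorem pv_hit0 (s : String) :
    pvHit (PySem.Str.lower s).toList 0
      = (["born", "birth", "native"].any (fun w => PySem.Str.isIn w (PySem.Str.lower s))) := by
  simp [pvHit, pvKw_items]

theorem pv_hit1 (s : String) :
    pvHit (PySem.Str.lower s).toList 1
      = (["died", "death"].any (fun w => PySem.Str.isIn w (PySem.Str.lower s))) := by
  simp [pvHit, pvKw_items]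

theorem pv_hit2 (s : String) :
    pvHit (PySem.Str.lower s).toList 2
      = (["located", "location", "place", "country", "city"].any (fun w => PySem.Str.isIn w (PySem.Str.lower s))) := by
  simp [pvHit, pvKw_items]

theorem pv_hit3 (s : String) :
    pvHit (PySem.Str.lower s).toList 3
      = (["author", "wrote", "composed", "created"].any (fun w => PySem.Str.isIn w (PySem.Str.lower s))) := by
  simp [pvHit, pvKw_items]

theorem pv_hit4 (s : String) :
    pvHit (PySem.Str.lower s).toList 4
      = (["directed", "director"].any (fun w => PySem.Str.isIn w (PySem.Str.lower s))) := by
  simp [pvHit, pvKw_items]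

theorem pv_hit5 (s : String) :
    pvHit (PySem.Str.lower s).toList 5
      = (["educated", "studied", "school", "university"].any (fun w => PySem.Str.isIn w (PySem.Str.lower s))) := by
  simp [pvHit, pvKw_items]

theorem pv_hit6 (s : String) :
    pvHit (PySem.Str.lower s).toList 6
      = (["founded", "owned", "acquired"].any (fun w => PySem.Str.isIn w (PySem.Str.lower s))) := by
  simp [pvHit, pvKw_items]

theorem pv_hit7 (s : String) :
    pvHit (PySem.Str.lower s).toList 7
      = (["employed", "works_for", "plays_for", "ceo"].any (fun w => PySem.Str.isIn w (PySem.Str.lower s))) := by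
  simp [pvHit, pvKw_items]

theorem pv_hit8 (s : String) :
    pvHit (PySem.Str.lower s).toList 8
      = (["father", "mother", "spouse", "child", "married"].any (fun w => PySem.Str.isIn w (PySem.Str.lower s))) := by
  simp [pvHit, pvKw_items]

theorem pv_hit9 (s : String) :
    pvHit (PySem.Str.lower s).toList 9
      = (["citizen", "nationality"].any (fun w => PySem.Str.isIn w (PySem.Str.lower s))) := by
  simp [pvHit, pvKw_items]

theorem pv_hit10 (s : String) :
    pvHit (PySem.Str.lower s).toList 10
      = (["instance", "type", "kind", "class", "occupation", "genre"].any (fun w => PySem.Str.isIn w (PySem.Str.lower s))) := by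
  simp [pvHit, pvKw_items]

theorem pv_hit11 (s : String) :
    pvHit (PySem.Str.lower s).toList 11
      = (["part_of", "member", "contains", "has_part"].any (fun w => PySem.Str.isIn w (PySem.Str.lower s))) := by
  simp [pvHit, pvKw_items]

theorem pv_main (relation : String) (bindings : List (String × String)) :
    infer_from_name_py relation bindings
      = ((pvVal (pvMin (PySem.Str.lower relation).toList)).2.1,
         (pvVal (pvMin (PySem.Str.lower relation).toList)).2.2, bindings) := by
  unfold infer_from_name_py
  show (if ["born", "birth", "native"].any (fun w => PySem.Str.isIn w (PySem.Str.lower relation)) then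
      ("PTRANS", "Birth", bindings)
    else if ["died", "death"].any (fun w => PySem.Str.isIn w (PySem.Str.lower relation)) then
      ("PTRANS", "Death", bindings)
    else if ["located", "location", "place", "country", "city"].any (fun w => PySem.Str.isIn w (PySem.Str.lower relation)) then
      ("PTRANS", "Location", bindings)
    else if ["author", "wrote", "composed", "created"].any (fun w => PySem.Str.isIn w (PySem.Str.lower relation)) then
      ("MTRANS", "Authorship", bindings)
    else if ["directed", "director"].any (fun w => PySem.Str.isIn w (PySem.Str.lower relation)) then
      ("MTRANS", "Direction", bindings)
    else if ["educated", "studied", "school", "university"].any (fun w => PySem.Str.isIn w (PySem.Str.lower relation)) then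
      ("MTRANS", "Education", bindings)
    else if ["founded", "owned", "acquired"].any (fun w => PySem.Str.isIn w (PySem.Str.lower relation)) then
      ("ATRANS", "Ownership", bindings)
    else if ["employed", "works_for", "plays_for", "ceo"].any (fun w => PySem.Str.isIn w (PySem.Str.lower relation)) then
      ("ATRANS", "Employment", bindings)
    else if ["father", "mother", "spouse", "child", "married"].any (fun w => PySem.Str.isIn w (PySem.Str.lower relation)) then
      ("ATRANS", "Kinship", bindings)
    else if ["citizen", "nationality"].any (fun w => PySem.Str.isIn w (PySem.Str.lower relation)) then
      ("ATRANS", "Citizenship", bindings)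
    else if ["instance", "type", "kind", "class", "occupation", "genre"].any (fun w => PySem.Str.isIn w (PySem.Str.lower relation)) then
      ("IS_A", "Instance", bindings)
    else if ["part_of", "member", "contains", "has_part"].any (fun w => PySem.Str.isIn w (PySem.Str.lower relation)) then
      ("PARTOF", "Component", bindings)
    else
      ("TRANSFER", "Unknown", bindings))
      = ((pvVal (pvMin (PySem.Str.lower relation).toList)).2.1,
         (pvVal (pvMin (PySem.Str.lower relation).toList)).2.2, bindings)
  cases hc0 : ["born", "birth", "native"].any (fun w => PySem.Str.isIn w (PySem.Str.lower relation)) with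
  | true =>
    rw [if_pos rfl]
    have hh : pvHit (PySem.Str.lower relation).toList 0 = true := by
      rw [pv_hit0 relation]; exact hc0
    have hub := pv_min_le_of_hit _ 0 hh
    rcases pv_min_cases (PySem.Str.lower relation).toList with h12 | ⟨hhit, hge, hle⟩
    · omega
    · have hmj : pvMin (PySem.Str.lower relation).toList = 0 := by omega
      rw [hmj]
      rfl
  | false =>
    rw [if_neg Bool.false_ne_true]
    cases hc1 : ["died", "death"].any (fun w => PySem.Str.isIn w (PySem.Str.lower relation)) with
    | true =>
      rw [if_pos rfl]
      have hh : pvHit (PySem.Str.lower relation).toList 1 = true := by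
        rw [pv_hit1 relation]; exact hc1
      have hub := pv_min_le_of_hit _ 1 hh
      rcases pv_min_cases (PySem.Str.lower relation).toList with h12 | ⟨hhit, hge, hle⟩
      · omega
      · have hcases : pvMin (PySem.Str.lower relation).toList = 0 ∨ pvMin (PySem.Str.lower relation).toList = 1 := by omega
        rcases hcases with hmj|hmj
        · rw [hmj, pv_hit0 relation] at hhit
          rw [hc0] at hhit
          exact absurd hhit Bool.false_ne_true
        · rw [hmj]
          rfl
    | false =>
      rw [if_neg Bool.false_ne_true]
      cases hc2 : ["located", "location", "place", "country", "city"].any (fun w => PySem.Str.isIn w (PySem.Str.lower relation)) with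
      | true =>
        rw [if_pos rfl]
        have hh : pvHit (PySem.Str.lower relation).toList 2 = true := by
          rw [pv_hit2 relation]; exact hc2
        have hub := pv_min_le_of_hit _ 2 hh
        rcases pv_min_cases (PySem.Str.lower relation).toList with h12 | ⟨hhit, hge, hle⟩
        · omega
        · have hcases : pvMin (PySem.Str.lower relation).toList = 0 ∨ pvMin (PySem.Str.lower relation).toList = 1 ∨ pvMin (PySem.Str.lower relation).toList = 2 := by omega
          rcases hcases with hmj|hmj|hmj
          · rw [hmj, pv_hit0 relation] at hhit
            rw [hc0] at hhit
            exact absurd hhit Bool.false_ne_true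
          · rw [hmj, pv_hit1 relation] at hhit
            rw [hc1] at hhit
            exact absurd hhit Bool.false_ne_true
          · rw [hmj]
            rfl
      | false =>
        rw [if_neg Bool.false_ne_true]
        cases hc3 : ["author", "wrote", "composed", "created"].any (fun w => PySem.Str.isIn w (PySem.Str.lower relation)) with
        | true =>
          rw [if_pos rfl]
          have hh : pvHit (PySem.Str.lower relation).toList 3 = true := by
            rw [pv_hit3 relation]; exact hc3
          have hub := pv_min_le_of_hit _ 3 hh
          rcases pv_min_cases (PySem.Str.lower relation).toList with h12 | ⟨hhit, hge, hle⟩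
          · omega
          · have hcases : pvMin (PySem.Str.lower relation).toList = 0 ∨ pvMin (PySem.Str.lower relation).toList = 1 ∨ pvMin (PySem.Str.lower relation).toList = 2 ∨ pvMin (PySem.Str.lower relation).toList = 3 := by omega
            rcases hcases with hmj|hmj|hmj|hmj
            · rw [hmj, pv_hit0 relation] at hhit
              rw [hc0] at hhit
              exact absurd hhit Bool.false_ne_true
            · rw [hmj, pv_hit1 relation] at hhit
              rw [hc1] at hhit
              exact absurd hhit Bool.false_ne_true
            · rw [hmj, pv_hit2 relation] at hhit
              rw [hc2] at hhit
              exact absurd hhit Bool.false_ne_true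
            · rw [hmj]
              rfl
        | false =>
          rw [if_neg Bool.false_ne_true]
          cases hc4 : ["directed", "director"].any (fun w => PySem.Str.isIn w (PySem.Str.lower relation)) with
          | true =>
            rw [if_pos rfl]
            have hh : pvHit (PySem.Str.lower relation).toList 4 = true := by
              rw [pv_hit4 relation]; exact hc4
            have hub := pv_min_le_of_hit _ 4 hh
            rcases pv_min_cases (PySem.Str.lower relation).toList with h12 | ⟨hhit, hge, hle⟩
            · omega
            · have hcases : pvMin (PySem.Str.lower relation).toList = 0 ∨ pvMin (PySem.Str.lower relation).toList = 1 ∨ pvMin (PySem.Str.lower relation).toList = 2 ∨ pvMin (PySem.Str.lower relation).toList = 3 ∨ pvMin (PySem.Str.lower relation).toList = 4 := by omega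
              rcases hcases with hmj|hmj|hmj|hmj|hmj
              · rw [hmj, pv_hit0 relation] at hhit
                rw [hc0] at hhit
                exact absurd hhit Bool.false_ne_true
              · rw [hmj, pv_hit1 relation] at hhit
                rw [hc1] at hhit
                exact absurd hhit Bool.false_ne_true
              · rw [hmj, pv_hit2 relation] at hhit
                rw [hc2] at hhit
                exact absurd hhit Bool.false_ne_true
              · rw [hmj, pv_hit3 relation] at hhit
                rw [hc3] at hhit
                exact absurd hhit Bool.false_ne_true
              · rw [hmj]
                rfl
          | false =>
            rw [if_neg Bool.false_ne_true]
            cases hc5 : ["educated", "studied", "school", "university"].any (fun w => PySem.Str.isIn w (PySem.Str.lower relation)) with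
            | true =>
              rw [if_pos rfl]
              have hh : pvHit (PySem.Str.lower relation).toList 5 = true := by
                rw [pv_hit5 relation]; exact hc5
              have hub := pv_min_le_of_hit _ 5 hh
              rcases pv_min_cases (PySem.Str.lower relation).toList with h12 | ⟨hhit, hge, hle⟩
              · omega
              · have hcases : pvMin (PySem.Str.lower relation).toList = 0 ∨ pvMin (PySem.Str.lower relation).toList = 1 ∨ pvMin (PySem.Str.lower relation).toList = 2 ∨ pvMin (PySem.Str.lower relation).toList = 3 ∨ pvMin (PySem.Str.lower relation).toList = 4 ∨ pvMin (PySem.Str.lower relation).toList = 5 := by omega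
                rcases hcases with hmj|hmj|hmj|hmj|hmj|hmj
                · rw [hmj, pv_hit0 relation] at hhit
                  rw [hc0] at hhit
                  exact absurd hhit Bool.false_ne_true
                · rw [hmj, pv_hit1 relation] at hhit
                  rw [hc1] at hhit
                  exact absurd hhit Bool.false_ne_true
                · rw [hmj, pv_hit2 relation] at hhit
                  rw [hc2] at hhit
                  exact absurd hhit Bool.false_ne_true
                · rw [hmj, pv_hit3 relation] at hhit
                  rw [hc3] at hhit
                  exact absurd hhit Bool.false_ne_true
                · rw [hmj, pv_hit4 relation] at hhit
                  rw [hc4] at hhit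
                  exact absurd hhit Bool.false_ne_true
                · rw [hmj]
                  rfl
            | false =>
              rw [if_neg Bool.false_ne_true]
              cases hc6 : ["founded", "owned", "acquired"].any (fun w => PySem.Str.isIn w (PySem.Str.lower relation)) with
              | true =>
                rw [if_pos rfl]
                have hh : pvHit (PySem.Str.lower relation).toList 6 = true := by
                  rw [pv_hit6 relation]; exact hc6
                have hub := pv_min_le_of_hit _ 6 hh
                rcases pv_min_cases (PySem.Str.lower relation).toList with h12 | ⟨hhit, hge, hle⟩
                · omega
                · have hcases : pvMin (PySem.Str.lower relation).toList = 0 ∨ pvMin (PySem.Str.lower relation).toList = 1 ∨ pvMin (PySem.Str.lower relation).toList = 2 ∨ pvMin (PySem.Str.lower relation).toList = 3 ∨ pvMin (PySem.Str.lower relation).toList = 4 ∨ pvMin (PySem.Str.lower relation).toList = 5 ∨ pvMin (PySem.Str.lower relation).toList = 6 := by omega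
                  rcases hcases with hmj|hmj|hmj|hmj|hmj|hmj|hmj
                  · rw [hmj, pv_hit0 relation] at hhit
                    rw [hc0] at hhit
                    exact absurd hhit Bool.false_ne_true
                  · rw [hmj, pv_hit1 relation] at hhit
                    rw [hc1] at hhit
                    exact absurd hhit Bool.false_ne_true
                  · rw [hmj, pv_hit2 relation] at hhit
                    rw [hc2] at hhit
                    exact absurd hhit Bool.false_ne_true
                  · rw [hmj, pv_hit3 relation] at hhit
                    rw [hc3] at hhit
                    exact absurd hhit Bool.false_ne_true
                  · rw [hmj, pv_hit4 relation] at hhit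
                    rw [hc4] at hhit
                    exact absurd hhit Bool.false_ne_true
                  · rw [hmj, pv_hit5 relation] at hhit
                    rw [hc5] at hhit
                    exact absurd hhit Bool.false_ne_true
                  · rw [hmj]
                    rfl
              | false =>
                rw [if_neg Bool.false_ne_true]
                cases hc7 : ["employed", "works_for", "plays_for", "ceo"].any (fun w => PySem.Str.isIn w (PySem.Str.lower relation)) with
                | true =>
                  rw [if_pos rfl]
                  have hh : pvHit (PySem.Str.lower relation).toList 7 = true := by
                    rw [pv_hit7 relation]; exact hc7
                  have hub := pv_min_le_of_hit _ 7 hh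
                  rcases pv_min_cases (PySem.Str.lower relation).toList with h12 | ⟨hhit, hge, hle⟩
                  · omega
                  · have hcases : pvMin (PySem.Str.lower relation).toList = 0 ∨ pvMin (PySem.Str.lower relation).toList = 1 ∨ pvMin (PySem.Str.lower relation).toList = 2 ∨ pvMin (PySem.Str.lower relation).toList = 3 ∨ pvMin (PySem.Str.lower relation).toList = 4 ∨ pvMin (PySem.Str.lower relation).toList = 5 ∨ pvMin (PySem.Str.lower relation).toList = 6 ∨ pvMin (PySem.Str.lower relation).toList = 7 := by omega
                    rcases hcases with hmj|hmj|hmj|hmj|hmj|hmj|hmj|hmj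
                    · rw [hmj, pv_hit0 relation] at hhit
                      rw [hc0] at hhit
                      exact absurd hhit Bool.false_ne_true
                    · rw [hmj, pv_hit1 relation] at hhit
                      rw [hc1] at hhit
                      exact absurd hhit Bool.false_ne_true
                    · rw [hmj, pv_hit2 relation] at hhit
                      rw [hc2] at hhit
                      exact absurd hhit Bool.false_ne_true
                    · rw [hmj, pv_hit3 relation] at hhit
                      rw [hc3] at hhit
                      exact absurd hhit Bool.false_ne_true
                    · rw [hmj, pv_hit4 relation] at hhit
                      rw [hc4] at hhit
                      exact absurd hhit Bool.false_ne_true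
                    · rw [hmj, pv_hit5 relation] at hhit
                      rw [hc5] at hhit
                      exact absurd hhit Bool.false_ne_true
                    · rw [hmj, pv_hit6 relation] at hhit
                      rw [hc6] at hhit
                      exact absurd hhit Bool.false_ne_true
                    · rw [hmj]
                      rfl
                | false =>
                  rw [if_neg Bool.false_ne_true]
                  cases hc8 : ["father", "mother", "spouse", "child", "married"].any (fun w => PySem.Str.isIn w (PySem.Str.lower relation)) with
                  | true =>
                    rw [if_pos rfl]
                    have hh : pvHit (PySem.Str.lower relation).toList 8 = true := by
                      rw [pv_hit8 relation]; exact hc8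
                    have hub := pv_min_le_of_hit _ 8 hh
                    rcases pv_min_cases (PySem.Str.lower relation).toList with h12 | ⟨hhit, hge, hle⟩
                    · omega
                    · have hcases : pvMin (PySem.Str.lower relation).toList = 0 ∨ pvMin (PySem.Str.lower relation).toList = 1 ∨ pvMin (PySem.Str.lower relation).toList = 2 ∨ pvMin (PySem.Str.lower relation).toList = 3 ∨ pvMin (PySem.Str.lower relation).toList = 4 ∨ pvMin (PySem.Str.lower relation).toList = 5 ∨ pvMin (PySem.Str.lower relation).toList = 6 ∨ pvMin (PySem.Str.lower relation).toList = 7 ∨ pvMin (PySem.Str.lower relation).toList = 8 := by omega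
                      rcases hcases with hmj|hmj|hmj|hmj|hmj|hmj|hmj|hmj|hmj
                      · rw [hmj, pv_hit0 relation] at hhit
                        rw [hc0] at hhit
                        exact absurd hhit Bool.false_ne_true
                      · rw [hmj, pv_hit1 relation] at hhit
                        rw [hc1] at hhit
                        exact absurd hhit Bool.false_ne_true
                      · rw [hmj, pv_hit2 relation] at hhit
                        rw [hc2] at hhit
                        exact absurd hhit Bool.false_ne_true
                      · rw [hmj, pv_hit3 relation] at hhit
                        rw [hc3] at hhit
                        exact absurd hhit Bool.false_ne_true
                      · rw [hmj, pv_hit4 relation] at hhit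
                        rw [hc4] at hhit
                        exact absurd hhit Bool.false_ne_true
                      · rw [hmj, pv_hit5 relation] at hhit
                        rw [hc5] at hhit
                        exact absurd hhit Bool.false_ne_true
                      · rw [hmj, pv_hit6 relation] at hhit
                        rw [hc6] at hhit
                        exact absurd hhit Bool.false_ne_true
                      · rw [hmj, pv_hit7 relation] at hhit
                        rw [hc7] at hhit
                        exact absurd hhit Bool.false_ne_true
                      · rw [hmj]
                        rfl
                  | false =>
                    rw [if_neg Bool.false_ne_true]
                    cases hc9 : ["citizen", "nationality"].any (fun w => PySem.Str.isIn w (PySem.Str.lower relation)) with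
                    | true =>
                      rw [if_pos rfl]
                      have hh : pvHit (PySem.Str.lower relation).toList 9 = true := by
                        rw [pv_hit9 relation]; exact hc9
                      have hub := pv_min_le_of_hit _ 9 hh
                      rcases pv_min_cases (PySem.Str.lower relation).toList with h12 | ⟨hhit, hge, hle⟩
                      · omega
                      · have hcases : pvMin (PySem.Str.lower relation).toList = 0 ∨ pvMin (PySem.Str.lower relation).toList = 1 ∨ pvMin (PySem.Str.lower relation).toList = 2 ∨ pvMin (PySem.Str.lower relation).toList = 3 ∨ pvMin (PySem.Str.lower relation).toList = 4 ∨ pvMin (PySem.Str.lower relation).toList = 5 ∨ pvMin (PySem.Str.lower relation).toList = 6 ∨ pvMin (PySem.Str.lower relation).toList = 7 ∨ pvMin (PySem.Str.lower relation).toList = 8 ∨ pvMin (PySem.Str.lower relation).toList = 9 := by omega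
                        rcases hcases with hmj|hmj|hmj|hmj|hmj|hmj|hmj|hmj|hmj|hmj
                        · rw [hmj, pv_hit0 relation] at hhit
                          rw [hc0] at hhit
                          exact absurd hhit Bool.false_ne_true
                        · rw [hmj, pv_hit1 relation] at hhit
                          rw [hc1] at hhit
                          exact absurd hhit Bool.false_ne_true
                        · rw [hmj, pv_hit2 relation] at hhit
                          rw [hc2] at hhit
                          exact absurd hhit Bool.false_ne_true
                        · rw [hmj, pv_hit3 relation] at hhit
                          rw [hc3] at hhit
                          exact absurd hhit Bool.false_ne_true
                        · rw [hmj, pv_hit4 relation] at hhit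
                          rw [hc4] at hhit
                          exact absurd hhit Bool.false_ne_true
                        · rw [hmj, pv_hit5 relation] at hhit
                          rw [hc5] at hhit
                          exact absurd hhit Bool.false_ne_true
                        · rw [hmj, pv_hit6 relation] at hhit
                          rw [hc6] at hhit
                          exact absurd hhit Bool.false_ne_true
                        · rw [hmj, pv_hit7 relation] at hhit
                          rw [hc7] at hhit
                          exact absurd hhit Bool.false_ne_true
                        · rw [hmj, pv_hit8 relation] at hhit
                          rw [hc8] at hhit
                          exact absurd hhit Bool.false_ne_true
                        · rw [hmj]
                          rfl
                    | false =>
                      rw [if_neg Bool.false_ne_true]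
                      cases hc10 : ["instance", "type", "kind", "class", "occupation", "genre"].any (fun w => PySem.Str.isIn w (PySem.Str.lower relation)) with
                      | true =>
                        rw [if_pos rfl]
                        have hh : pvHit (PySem.Str.lower relation).toList 10 = true := by
                          rw [pv_hit10 relation]; exact hc10
                        have hub := pv_min_le_of_hit _ 10 hh
                        rcases pv_min_cases (PySem.Str.lower relation).toList with h12 | ⟨hhit, hge, hle⟩
                        · omega
                        · have hcases : pvMin (PySem.Str.lower relation).toList = 0 ∨ pvMin (PySem.Str.lower relation).toList = 1 ∨ pvMin (PySem.Str.lower relation).toList = 2 ∨ pvMin (PySem.Str.lower relation).toList = 3 ∨ pvMin (PySem.Str.lower relation).toList = 4 ∨ pvMin (PySem.Str.lower relation).toList = 5 ∨ pvMin (PySem.Str.lower relation).toList = 6 ∨ pvMin (PySem.Str.lower relation).toList = 7 ∨ pvMin (PySem.Str.lower relation).toList = 8 ∨ pvMin (PySem.Str.lower relation).toList = 9 ∨ pvMin (PySem.Str.lower relation).toList = 10 := by omega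
                          rcases hcases with hmj|hmj|hmj|hmj|hmj|hmj|hmj|hmj|hmj|hmj|hmj
                          · rw [hmj, pv_hit0 relation] at hhit
                            rw [hc0] at hhit
                            exact absurd hhit Bool.false_ne_true
                          · rw [hmj, pv_hit1 relation] at hhit
                            rw [hc1] at hhit
                            exact absurd hhit Bool.false_ne_true
                          · rw [hmj, pv_hit2 relation] at hhit
                            rw [hc2] at hhit
                            exact absurd hhit Bool.false_ne_true
                          · rw [hmj, pv_hit3 relation] at hhit
                            rw [hc3] at hhit
                            exact absurd hhit Bool.false_ne_true
                          · rw [hmj, pv_hit4 relation] at hhit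
                            rw [hc4] at hhit
                            exact absurd hhit Bool.false_ne_true
                          · rw [hmj, pv_hit5 relation] at hhit
                            rw [hc5] at hhit
                            exact absurd hhit Bool.false_ne_true
                          · rw [hmj, pv_hit6 relation] at hhit
                            rw [hc6] at hhit
                            exact absurd hhit Bool.false_ne_true
                          · rw [hmj, pv_hit7 relation] at hhit
                            rw [hc7] at hhit
                            exact absurd hhit Bool.false_ne_true
                          · rw [hmj, pv_hit8 relation] at hhit
                            rw [hc8] at hhit
                            exact absurd hhit Bool.false_ne_true
                          · rw [hmj, pv_hit9 relation] at hhit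
                            rw [hc9] at hhit
                            exact absurd hhit Bool.false_ne_true
                          · rw [hmj]
                            rfl
                      | false =>
                        rw [if_neg Bool.false_ne_true]
                        cases hc11 : ["part_of", "member", "contains", "has_part"].any (fun w => PySem.Str.isIn w (PySem.Str.lower relation)) with
                        | true =>
                          rw [if_pos rfl]
                          have hh : pvHit (PySem.Str.lower relation).toList 11 = true := by
                            rw [pv_hit11 relation]; exact hc11
                          have hub := pv_min_le_of_hit _ 11 hh
                          rcases pv_min_cases (PySem.Str.lower relation).toList with h12 | ⟨hhit, hge, hle⟩
                          · omega
                          · have hcases : pvMin (PySem.Str.lower relation).toList = 0 ∨ pvMin (PySem.Str.lower relation).toList = 1 ∨ pvMin (PySem.Str.lower relation).toList = 2 ∨ pvMin (PySem.Str.lower relation).toList = 3 ∨ pvMin (PySem.Str.lower relation).toList = 4 ∨ pvMin (PySem.Str.lower relation).toList = 5 ∨ pvMin (PySem.Str.lower relation).toList = 6 ∨ pvMin (PySem.Str.lower relation).toList = 7 ∨ pvMin (PySem.Str.lower relation).toList = 8 ∨ pvMin (PySem.Str.lower relation).toList = 9 ∨ pvMin (PySem.Str.lower relation).toList = 10 ∨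 pvMin (PySem.Str.lower relation).toList = 11 := by omega
                            rcases hcases with hmj|hmj|hmj|hmj|hmj|hmj|hmj|hmj|hmj|hmj|hmj|hmj
                            · rw [hmj, pv_hit0 relation] at hhit
                              rw [hc0] at hhit
                              exact absurd hhit Bool.false_ne_true
                            · rw [hmj, pv_hit1 relation] at hhit
                              rw [hc1] at hhit
                              exact absurd hhit Bool.false_ne_true
                            · rw [hmj, pv_hit2 relation] at hhit
                              rw [hc2] at hhit
                              exact absurd hhit Bool.false_ne_true
                            · rw [hmj, pv_hit3 relation] at hhit
                              rw [hc3] at hhit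
                              exact absurd hhit Bool.false_ne_true
                            · rw [hmj, pv_hit4 relation] at hhit
                              rw [hc4] at hhit
                              exact absurd hhit Bool.false_ne_true
                            · rw [hmj, pv_hit5 relation] at hhit
                              rw [hc5] at hhit
                              exact absurd hhit Bool.false_ne_true
                            · rw [hmj, pv_hit6 relation] at hhit
                              rw [hc6] at hhit
                              exact absurd hhit Bool.false_ne_true
                            · rw [hmj, pv_hit7 relation] at hhit
                              rw [hc7] at hhit
                              exact absurd hhit Bool.false_ne_true
                            · rw [hmj, pv_hit8 relation] at hhit
                              rw [hc8] at hhit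
                              exact absurd hhit Bool.false_ne_true
                            · rw [hmj, pv_hit9 relation] at hhit
                              rw [hc9] at hhit
                              exact absurd hhit Bool.false_ne_true
                            · rw [hmj, pv_hit10 relation] at hhit
                              rw [hc10] at hhit
                              exact absurd hhit Bool.false_ne_true
                            · rw [hmj]
                              rfl
                        | false =>
                          rw [if_neg Bool.false_ne_true]
                          rcases pv_min_cases (PySem.Str.lower relation).toList with h12 | ⟨hhit, hge, hle⟩
                          · rw [h12]
                            rfl
                          · have hcases : pvMin (PySem.Str.lower relation).toList = 0 ∨ pvMin (PySem.Str.lower relation).toList = 1 ∨ pvMin (PySem.Str.lower relation).toList = 2 ∨ pvMin (PySem.Str.lower relation).toList = 3 ∨ pvMin (PySem.Str.lower relation).toList = 4 ∨ pvMin (PySem.Str.lower relation).toList = 5 ∨ pvMin (PySem.Str.lower relation).toList = 6 ∨ pvMin (PySem.Str.lower relation).toList = 7 ∨ pvMin (PySem.Str.lower relation).toList = 8 ∨ pvMin (PySem.Str.lower relation).toList = 9 ∨ pvMin (PySem.Str.lower relation).toList = 10 ∨ pvMin (PySem.Str.lower relation).toList = 11 := by omega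
                            rcases hcases with hmj|hmj|hmj|hmj|hmj|hmj|hmj|hmj|hmj|hmj|hmj|hmj
                            · rw [hmj, pv_hit0 relation] at hhit
                              rw [hc0] at hhit
                              exact absurd hhit Bool.false_ne_true
                            · rw [hmj, pv_hit1 relation] at hhit
                              rw [hc1] at hhit
                              exact absurd hhit Bool.false_ne_true
                            · rw [hmj, pv_hit2 relation] at hhit
                              rw [hc2] at hhit
                              exact absurd hhit Bool.false_ne_true
                            · rw [hmj, pv_hit3 relation] at hhit
                              rw [hc3] at hhit
                              exact absurd hhit Bool.false_ne_true
                            · rw [hmj, pv_hit4 relation] at hhit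
                              rw [hc4] at hhit
                              exact absurd hhit Bool.false_ne_true
                            · rw [hmj, pv_hit5 relation] at hhit
                              rw [hc5] at hhit
                              exact absurd hhit Bool.false_ne_true
                            · rw [hmj, pv_hit6 relation] at hhit
                              rw [hc6] at hhit
                              exact absurd hhit Bool.false_ne_true
                            · rw [hmj, pv_hit7 relation] at hhit
                              rw [hc7] at hhit
                              exact absurd hhit Bool.false_ne_true
                            · rw [hmj, pv_hit8 relation] at hhit
                              rw [hc8] at hhit
                              exact absurd hhit Bool.false_ne_true
                            · rw [hmj, pv_hit9 relation] at hhit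
                              rw [hc9] at hhit
                              exact absurd hhit Bool.false_ne_true
                            · rw [hmj, pv_hit10 relation] at hhit
                              rw [hc10] at hhit
                              exact absurd hhit Bool.false_ne_true
                            · rw [hmj, pv_hit11 relation] at hhit
                              rw [hc11] at hhit
                              exact absurd hhit Bool.false_ne_true

-- ===== VERDICT (by name: the statement is the Claim_ definition above) =====
theorem infer_from_name_py_spec : Claim_equal_infer_from_name_py := by
  intro relation bindings _
  unfold Spec_infer_from_name_py
  rw [pv_main, pv_alt_eq]
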